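-- pv_equiv track=rewrite | github.com/slevithan/xregexp | tools/scripts/utils.py | createBMPRange
-- ===== SOURCE A (Python) =====
-- import math
--
-- def highSurrogate(codePoint):
-- 	return int(math.floor((codePoint - 0x10000) / 0x400) + 0xD800)
--
-- def lowSurrogate(codePoint):
-- 	return int((codePoint - 0x10000) % 0x400 + 0xDC00)
--
-- def codePointToString(codePoint):
-- 	if codePoint == 0:
-- 		string = '\\0' # http://mathiasbynens.be/notes/javascript-escapes#single
-- 	elif (codePoint >= 0x41 and codePoint <= 0x5A) or (codePoint >= 0x61 and codePoint <= 0x7A) or (codePoint >= 0x30 and codePoint <= 0x39): # [a-zA-Z0-9]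
-- 		string = chr(codePoint)
-- 	elif codePoint in [0x24, 0x28, 0x29, 0x2A, 0x2B, 0x2D, 0x2E, 0x3F, 0x5B, 0x5C, 0x5D, 0x5E, 0x7B, 0x7C]: # metacharacters
-- 		string = '\\\\x' + '%02X' % codePoint
-- 	elif codePoint <= 0xFF: # http://mathiasbynens.be/notes/javascript-escapes#hexadecimal
-- 		string = '\\x' + '%02X' % codePoint
-- 	elif codePoint <= 0xFFFF: # http://mathiasbynens.be/notes/javascript-escapes#unicode
-- 		string = '\\u' + '%04X' % codePoint
-- 	else: # surrogate pairs
-- 		string = '\\u' + '%04X' % highSurrogate(codePoint) + '\\u' + '%04X' % lowSurrogate(codePoint)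
-- 	return string
--
-- def createBMPRange(r, addBrackets=True):
-- 	if len(r) == 0:
-- 		return ''
--
-- 	buf = []
-- 	start = r[0]
-- 	end = r[0]
-- 	predict = start + 1
-- 	r = r[1:]
--
-- 	counter = 0
-- 	for code in r:
-- 		if predict == code:
-- 			end = code
-- 			predict = code + 1
-- 			continue
-- 		else:
-- 			if start == end:
-- 				buf.append(codePointToString(start))
-- 				counter += 1
-- 			elif end == start + 1:
-- 				buf.append('%s%s' % (codePointToString(start), codePointToString(end)))
-- 				counter += 2
-- 			else:
-- 				buf.append('%s-%s' % (codePointToString(start), codePointToString(end)))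
-- 				counter += 2
-- 			start = code
-- 			end = code
-- 			predict = code + 1
--
-- 	if start == end:
-- 		buf.append(codePointToString(start))
-- 		counter += 1
-- 	elif end == start + 1:
-- 		buf.append('%s%s' % (codePointToString(start), codePointToString(end)))
-- 		counter += 2
-- 	else:
-- 		buf.append('%s-%s' % (codePointToString(start), codePointToString(end)))
-- 		counter += 2
--
-- 	if addBrackets == False or counter == 1:
-- 		return ''.join(buf)
-- 	else:
-- 		return '[' + ''.join(buf) + ']'
-- ===== SOURCE B (Python) =====
-- import math
--
-- def highSurrogate(codePoint):
-- 	return int(math.floor((codePoint - 0x10000) / 0x400) + 0xD800)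
--
-- def lowSurrogate(codePoint):
-- 	return int((codePoint - 0x10000) % 0x400 + 0xDC00)
--
-- def codePointToString(codePoint):
-- 	if codePoint == 0:
-- 		string = '\\0'
-- 	elif (codePoint >= 0x41 and codePoint <= 0x5A) or (codePoint >= 0x61 and codePoint <= 0x7A) or (codePoint >= 0x30 and codePoint <= 0x39):
-- 		string = chr(codePoint)
-- 	elif codePoint in [0x24, 0x28, 0x29, 0x2A, 0x2B, 0x2D, 0x2E, 0x3F, 0x5B, 0x5C, 0x5D, 0x5E, 0x7B, 0x7C]:
-- 		string = '\\\\x' + '%02X' % codePoint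
-- 	elif codePoint <= 0xFF:
-- 		string = '\\x' + '%02X' % codePoint
-- 	elif codePoint <= 0xFFFF:
-- 		string = '\\u' + '%04X' % codePoint
-- 	else:
-- 		string = '\\u' + '%04X' % highSurrogate(codePoint) + '\\u' + '%04X' % lowSurrogate(codePoint)
-- 	return string
--
-- def createBMPRange(r, addBrackets=True):
-- 	if not r:
-- 		return ''
-- 	# Scan from the RIGHT, building the maximal consecutive runs back-to-front
-- 	# as (start, length) pairs; runs_rev[-1] is the earliest run.
-- 	runs_rev = []
-- 	for v in reversed(r):
-- 		if runs_rev and runs_rev[-1][0] == v + 1: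
-- 			s, k = runs_rev[-1]
-- 			runs_rev[-1] = (v, k + 1)
-- 		else:
-- 			runs_rev.append((v, 1))
-- 	# Render each run from its start and length.
-- 	parts = []
-- 	for s, k in reversed(runs_rev):
-- 		if k == 1:
-- 			parts.append(codePointToString(s))
-- 		elif k == 2:
-- 			parts.append(codePointToString(s) + codePointToString(s + 1))
-- 		else:
-- 			parts.append(codePointToString(s) + '-' + codePointToString(s + k - 1))
-- 	body = ''.join(parts)
-- 	# brackets are dropped exactly when the whole input is a single codepoint
-- 	if not addBrackets or len(r) == 1:
-- 		return body
-- 	return '[' + body + ']'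
-- ===== Notes on version B (the rewrite author's own statement) =====
-- stated objective: alternative
-- what changed: B scans the list from the RIGHT, building the maximal consecutive runs back-to-front as (start,length) pairs, then renders each run from its length (singleton / pair / dashed range) and decides brackets by the simple test len(r)==1, replacing A's left-to-right state machine that emits strings inside the loop with a duplicated flush block and a character counter.
import Mathlib
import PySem

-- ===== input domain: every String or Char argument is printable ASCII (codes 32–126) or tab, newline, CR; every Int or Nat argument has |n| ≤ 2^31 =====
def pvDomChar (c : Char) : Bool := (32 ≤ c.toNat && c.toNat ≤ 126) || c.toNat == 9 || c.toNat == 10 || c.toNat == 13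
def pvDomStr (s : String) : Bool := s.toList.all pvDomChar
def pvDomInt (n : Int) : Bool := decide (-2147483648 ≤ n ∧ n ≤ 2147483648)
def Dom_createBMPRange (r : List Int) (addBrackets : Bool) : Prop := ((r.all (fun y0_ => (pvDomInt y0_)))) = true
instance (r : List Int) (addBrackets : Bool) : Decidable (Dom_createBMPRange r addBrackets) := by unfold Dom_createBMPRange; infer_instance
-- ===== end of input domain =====

-- B scans the list from the right, building (start,length) runs back-to-front, then renders each
-- run from its length and brackets iff len(r) ≠ 1 — replacing A's left-to-right emit-with-counter
-- loop (objective: alternative). Same return value on every input; no observable mutation.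

-- ===== PORT A =====

-- shared helpers, identical in Source A and Source B (ported once)

-- '%X' digits of a Nat, uppercase
def hexDigitChar (d : Nat) : Char :=
  if d < 10 then Char.ofNat (48 + d) else Char.ofNat (55 + d)

def hexNat (n : Nat) : List Char :=
  if h : n < 16 then [hexDigitChar n]
  else hexNat (n / 16) ++ [hexDigitChar (n % 16)]
  termination_by n
  decreasing_by exact Nat.div_lt_self (by omega) (by omega)

-- Python '%0<width>X' % n, exact including negatives (sign counts toward the width)
def hexPad (width : Nat) (n : Int) : String :=
  if n < 0 then
    let s := hexNat n.natAbs
    String.mk ('-' :: (List.replicate (width - 1 - s.length) '0' ++ s))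
  else
    let s := hexNat n.toNat
    String.mk (List.replicate (width - s.length) '0' ++ s)

-- Python uses int(math.floor((cp-0x10000)/0x400)): for |cp| ≤ 2^31 the float quotient by the
-- power of two 0x400 is exact, so this equals floor division (PySem.Int.floordiv), ported so.
def highSurrogate (codePoint : Int) : Int :=
  PySem.Int.floordiv (codePoint - 0x10000) 0x400 + 0xD800

def lowSurrogate (codePoint : Int) : Int :=
  PySem.Int.mod (codePoint - 0x10000) 0x400 + 0xDC00

def codePointToString (codePoint : Int) : String :=
  if codePoint == 0 then
    "\\0"
  else if (codePoint ≥ 0x41 && codePoint ≤ 0x5A) || (codePoint ≥ 0x61 && codePoint ≤ 0x7A)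
          || (codePoint ≥ 0x30 && codePoint ≤ 0x39) then
    String.mk [Char.ofNat codePoint.toNat]  -- chr on [a-zA-Z0-9] only, in range
  else if codePoint ∈ ([0x24, 0x28, 0x29, 0x2A, 0x2B, 0x2D, 0x2E, 0x3F, 0x5B, 0x5C,
                        0x5D, 0x5E, 0x7B, 0x7C] : List Int) then
    "\\\\x" ++ hexPad 2 codePoint
  else if codePoint ≤ 0xFF then
    "\\x" ++ hexPad 2 codePoint
  else if codePoint ≤ 0xFFFF then
    "\\u" ++ hexPad 4 codePoint
  else
    "\\u" ++ hexPad 4 (highSurrogate codePoint) ++ "\\u" ++ hexPad 4 (lowSurrogate codePoint)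

-- A's loop state: (buf, start, end, predict, counter)
def pvAStep (s : List String × Int × Int × Int × Int) (code : Int) :
    List String × Int × Int × Int × Int :=
  let (buf, start, end_, predict, counter) := s
  if predict == code then
    (buf, start, code, code + 1, counter)
  else if start == end_ then
    (buf ++ [codePointToString start], code, code, code + 1, counter + 1)
  else if end_ == start + 1 then
    (buf ++ [codePointToString start ++ codePointToString end_], code, code, code + 1, counter + 2)
  else
    (buf ++ [codePointToString start ++ "-" ++ codePointToString end_], code, code, code + 1,
      counter + 2)

def createBMPRange (r : List Int) (addBrackets : Bool) : String :=
  match r with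
  | [] => ""
  | r0 :: rest =>
    let st := rest.foldl pvAStep ([], r0, r0, r0 + 1, 0)
    let (buf, start, end_, _, counter) := st
    let (buf2, counter2) :=
      if start == end_ then (buf ++ [codePointToString start], counter + 1)
      else if end_ == start + 1 then
        (buf ++ [codePointToString start ++ codePointToString end_], counter + 2)
      else
        (buf ++ [codePointToString start ++ "-" ++ codePointToString end_], counter + 2)
    if addBrackets == false || counter2 == 1 then String.join buf2
    else "[" ++ String.join buf2 ++ "]"

-- ===== PORT B =====

-- one step of B's right-to-left scan: runs_rev holds (start, length) runs, earliest run LAST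
def pvMergeRev (acc : List (Int × Nat)) (v : Int) : List (Int × Nat) :=
  match acc.getLast? with
  | some (s, k) => if s == v + 1 then acc.dropLast ++ [(v, k + 1)] else acc ++ [(v, 1)]
  | none => [(v, 1)]

-- B renders a run from its start and its length
def pvFmt (p : Int × Nat) : String :=
  if p.2 == 1 then codePointToString p.1
  else if p.2 == 2 then codePointToString p.1 ++ codePointToString (p.1 + 1)
  else codePointToString p.1 ++ "-" ++ codePointToString (p.1 + (p.2 : Int) - 1)

def createBMPRange_alt (r : List Int) (addBrackets : Bool) : String :=
  match r with
  | [] => ""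
  | _ :: _ =>
    let runsRev := (r.reverse).foldl pvMergeRev []
    let body := String.join ((runsRev.reverse).map pvFmt)
    if !addBrackets || r.length == 1 then body else "[" ++ body ++ "]"

-- ===== PRECONDITION & SPEC =====
def Spec_createBMPRange (r : List Int) (addBrackets : Bool) (out : String) : Prop := out = createBMPRange_alt r addBrackets
instance (r : List Int) (addBrackets : Bool) (out : String) : Decidable (Spec_createBMPRange r addBrackets out) := by unfold Spec_createBMPRange; infer_instance

-- ===== CLAIM (what is proved, stated in full; the proofs are below) =====
def Claim_equal_createBMPRange : Prop := ∀ (r : List Int) (addBrackets : Bool), Dom_createBMPRange r addBrackets → Spec_createBMPRange r addBrackets (createBMPRange r addBrackets)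

-- ===== LEMMAS AND PROOFS =====

-- the head-merge (logical-order) version of B's step
def pvCons (v : Int) (runs : List (Int × Nat)) : List (Int × Nat) :=
  match runs with
  | (s, k) :: t => if s == v + 1 then (v, k + 1) :: t else (v, 1) :: (s, k) :: t
  | [] => [(v, 1)]

-- reference run decomposition: runs of s::…, current run started at s with k elements so far
def pvRuns (s : Int) (k : Nat) : List Int → List (Int × Nat)
  | [] => [(s, k)]
  | c :: cs => if c = s + (k : Int) then pvRuns s (k + 1) cs else (s, k) :: pvRuns c 1 cs

def pvBump (s : Int) : List (Int × Nat) → List (Int × Nat)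
  | (_, m) :: t => (s, m + 1) :: t
  | [] => []

def pvW (p : Int × Nat) : Int := if p.2 = 1 then 1 else 2

def pvWsum (l : List (Int × Nat)) : Int := (l.map pvW).sum

-- A's final flush block as a function of the loop state
def pvFlush (st : List String × Int × Int × Int × Int) : List String × Int :=
  let (buf, start, end_, _, counter) := st
  if start == end_ then (buf ++ [codePointToString start], counter + 1)
  else if end_ == start + 1 then
    (buf ++ [codePointToString start ++ codePointToString end_], counter + 2)
  else (buf ++ [codePointToString start ++ "-" ++ codePointToString end_], counter + 2)

theorem pvMergeRev_rev (l : List (Int × Nat)) (v : Int) :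
    pvMergeRev l.reverse v = (pvCons v l).reverse := by
  rcases l with _ | ⟨⟨s, k⟩, t⟩
  · simp [pvMergeRev, pvCons]
  · simp only [pvCons, List.reverse_cons, pvMergeRev, List.getLast?_concat, List.dropLast_concat]
    by_cases h : s = v + 1 <;> simp [h]

theorem pvFoldl_mergeRev (ys : List Int) (l : List (Int × Nat)) :
    ys.foldl pvMergeRev l.reverse = (ys.foldl (fun acc v => pvCons v acc) l).reverse := by
  induction ys generalizing l with
  | nil => rfl
  | cons y ys ih =>
    simp only [List.foldl_cons, pvMergeRev_rev]
    exact ih (pvCons y l)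

theorem pvRunsRev_eq (r : List Int) :
    ((r.reverse).foldl pvMergeRev []).reverse = r.foldr pvCons [] := by
  have h := pvFoldl_mergeRev r.reverse ([] : List (Int × Nat))
  simp only [List.reverse_nil] at h
  rw [h, List.reverse_reverse, List.foldl_reverse]

theorem pvRuns_shift (l : List Int) (s : Int) (k : Nat) :
    pvRuns s (k + 1) l = pvBump s (pvRuns (s + 1) k l) := by
  induction l generalizing s k with
  | nil => simp [pvRuns, pvBump]
  | cons c cs ih =>
    have hcond : (c = s + ((k : Int) + 1)) ↔ (c = s + 1 + (k : Int)) := by omega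
    simp only [pvRuns, Nat.cast_add, Nat.cast_one]
    by_cases h : c = s + 1 + (k : Int)
    · rw [if_pos (hcond.mpr h), if_pos h]
      exact ih s (k + 1)
    · rw [if_neg (fun hh => h (hcond.mp hh)), if_neg h]
      simp [pvBump]

theorem pvRuns_head (l : List Int) (s : Int) (k : Nat) :
    ∃ m t, pvRuns s k l = (s, m) :: t ∧ k ≤ m := by
  induction l generalizing s k with
  | nil => exact ⟨k, [], rfl, le_refl k⟩
  | cons c cs ih =>
    by_cases h : c = s + (k : Int)
    · obtain ⟨m, t, he, hm⟩ := ih s (k + 1)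
      exact ⟨m, t, by simp [pvRuns, h, he], by omega⟩
    · exact ⟨k, pvRuns c 1 cs, by simp [pvRuns, h], le_refl k⟩

theorem pvFoldr_pvCons (rest : List Int) (r0 : Int) :
    (r0 :: rest).foldr pvCons [] = pvRuns r0 1 rest := by
  induction rest generalizing r0 with
  | nil => rfl
  | cons d ys ih =>
    have hd : (d :: ys).foldr pvCons [] = pvRuns d 1 ys := ih d
    obtain ⟨m, t, he, _⟩ := pvRuns_head ys d 1
    simp only [List.foldr_cons] at hd ⊢
    rw [hd, he]
    by_cases h : d = r0 + 1
    · have : pvRuns r0 1 (d :: ys) = pvBump r0 (pvRuns (r0 + 1) 1 ys) := by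
        simp only [pvRuns, Nat.cast_one]
        rw [if_pos h]
        exact pvRuns_shift ys r0 1
      rw [this, ← h, he]
      simp [pvCons, h, pvBump]
    · have hr : pvRuns r0 1 (d :: ys) = (r0, 1) :: pvRuns d 1 ys := by
        simp only [pvRuns, Nat.cast_one]
        rw [if_neg (by omega)]
      rw [hr, he]
      simp [pvCons, show (d == r0 + 1) = false by
        simp only [beq_eq_false_iff_ne]; exact h]

theorem pvWsum_pos (l : List Int) (s : Int) (k : Nat) : 1 ≤ pvWsum (pvRuns s k l) := by
  induction l generalizing s k with
  | nil => simp [pvRuns, pvWsum, pvW]; split <;> omega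
  | cons c cs ih =>
    simp only [pvRuns]
    split
    · exact ih s (k + 1)
    · have h1 := ih c 1
      have hw : 1 ≤ pvW (s, k) := by unfold pvW; split <;> omega
      simp only [pvWsum, List.map_cons, List.sum_cons] at h1 ⊢
      omega

theorem pvWsum_ge2 (l : List Int) (s : Int) (k : Nat) (hk : 1 ≤ k)
    (h : l ≠ [] ∨ 2 ≤ k) : 2 ≤ pvWsum (pvRuns s k l) := by
  induction l generalizing s k with
  | nil =>
    have hk2 : 2 ≤ k := h.resolve_left (fun hh => hh rfl)
    simp only [pvRuns, pvWsum, List.map_cons, List.map_nil, List.sum_cons, List.sum_nil, pvW]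
    split <;> omega
  | cons c cs ih =>
    simp only [pvRuns]
    split
    · exact ih s (k + 1) (by omega) (by omega)
    · have h1 := pvWsum_pos cs c 1
      have hw : 1 ≤ pvW (s, k) := by unfold pvW; split <;> omega
      simp only [pvWsum, List.map_cons, List.sum_cons] at h1 ⊢
      omega

theorem pvWsum_one_iff (rest : List Int) (r0 : Int) :
    (pvWsum (pvRuns r0 1 rest) == 1) = (rest.length == 0) := by
  rcases rest with _ | ⟨c, cs⟩
  · simp [pvRuns, pvWsum, pvW]
  · have h2 := pvWsum_ge2 (c :: cs) r0 1 (le_refl 1) (Or.inl (by simp))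
    simp only [List.length_cons]
    rw [show (pvWsum (pvRuns r0 1 (c :: cs)) == 1) = false by simp; omega]
    simp

-- the main loop invariant: A's fold + final flush produce exactly B's rendered runs and weights
theorem pvA_loop (rest : List Int) (s : Int) (k : Nat) (buf : List String) (c : Int)
    (hk : 1 ≤ k) :
    pvFlush (rest.foldl pvAStep (buf, s, s + (k : Int) - 1, s + (k : Int), c)) =
      (buf ++ (pvRuns s k rest).map pvFmt, c + pvWsum (pvRuns s k rest)) := by
  induction rest generalizing s k buf c with
  | nil =>
    simp only [List.foldl_nil, pvFlush, pvRuns, List.map_cons, List.map_nil, pvWsum,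
      List.sum_cons, List.sum_nil, pvFmt, pvW, beq_iff_eq]
    by_cases h1 : k = 1
    · subst h1; norm_num
    · by_cases h2 : k = 2
      · subst h2; push_cast
        rw [show s + (2 : Int) - 1 = s + 1 by ring]
        simp [show ¬(s = s + 1) by omega]
      · push_cast
        rw [if_neg (show ¬(s = s + (k : Int) - 1) by omega),
            if_neg (show ¬(s + (k : Int) - 1 = s + 1) by omega)]
        simp [h1, h2]
  | cons code cs ih =>
    simp only [List.foldl_cons]
    by_cases h : code = s + (k : Int)
    · have hstep : pvAStep (buf, s, s + (k : Int) - 1, s + (k : Int), c) code =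
          (buf, s, s + ((k : Int) + 1) - 1, s + ((k : Int) + 1), c) := by
        simp [pvAStep, h]; constructor <;> omega
      rw [hstep]
      have := ih s (k + 1) buf c (by omega)
      push_cast at this ⊢
      rw [this]
      simp [pvRuns, h]
    · have hne : (s + (k : Int) == code) = false := by simp; omega
      have hruns : pvRuns s k (code :: cs) = (s, k) :: pvRuns code 1 cs := by
        simp only [pvRuns]; rw [if_neg (by omega)]
      have htail := ih code 1 (buf ++ [pvFmt (s, k)]) (c + pvW (s, k)) (le_refl 1)
      norm_num at htail
      have hstep : pvAStep (buf, s, s + (k : Int) - 1, s + (k : Int), c) code =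
          (buf ++ [pvFmt (s, k)], code, code, code + 1, c + pvW (s, k)) := by
        simp only [pvAStep, hne, Bool.false_eq_true, if_false, pvFmt, pvW, beq_iff_eq]
        by_cases h1 : k = 1
        · subst h1; norm_num
        · by_cases h2 : k = 2
          · subst h2; push_cast
            rw [show s + (2 : Int) - 1 = s + 1 by ring]
            simp [show ¬(s = s + 1) by omega]
          · push_cast
            rw [if_neg (show ¬(s = s + (k : Int) - 1) by omega),
                if_neg (show ¬(s + (k : Int) - 1 = s + 1) by omega)]
            simp [h1, h2]
      rw [hstep, htail, hruns]
      simp [pvWsum]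
      omega

-- ===== VERDICT (by name: the statement is the Claim_ definition above) =====
theorem createBMPRange_spec : Claim_equal_createBMPRange := by
  intro r addBrackets _
  unfold Spec_createBMPRange
  rcases r with _ | ⟨r0, rest⟩
  · rfl
  · have hrw : ((((r0 :: rest).reverse).foldl pvMergeRev []).reverse).map pvFmt =
        (pvRuns r0 1 rest).map pvFmt := by
      rw [pvRunsRev_eq, pvFoldr_pvCons]
    have hA := pvA_loop rest r0 1 [] 0 (le_refl 1)
    norm_num at hA
    simp only [createBMPRange, createBMPRange_alt]
    set st := rest.foldl pvAStep ([], r0, r0, r0 + 1, 0) with hst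
    obtain ⟨buf, s, e, p, c⟩ := st
    simp only [pvFlush] at hA
    rw [hA, hrw]
    simp only [List.length_cons]
    rw [pvWsum_one_iff]
    rcases addBrackets <;> rcases rest <;> simp
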